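-- pv_equiv track=rewrite | github.com/judydudylol/ai-triage-streamlit | src/triage_engine.py | pick_category
-- ===== SOURCE A (Python) =====
-- CATEGORY_RULES = {
--     "trauma_bleeding": {
--         "severe_bleeding", "heavy_bleeding", "moderate_bleeding",
--         "major_trauma", "head_injury"
--     },
--     "cardiac": {
--         "chest_pain", "chest_pain_crushing", "palpitations"
--     },
--     "respiratory": {
--         "shortness_of_breath", "wheezing", "choking",
--         "trouble_breathing", "turning_blue"
--     },
--     "neuro": {
--         "seizure_now", "fainting", "face_droop", "slurred_speech",
--         "arm_weakness", "stroke_signs", "confusion", "unconscious",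
--         "not_responding"
--     },
--     "allergic": {
--         "rash", "swelling_face_lips", "anaphylaxis_signs",
--         "severe_allergy_swelling"
--     },
--     "infection_fever": {
--         "fever", "high_fever", "chills"
--     },
--     "gi_dehydration": {
--         "vomiting", "vomiting_severe", "diarrhea", "diarrhea_severe",
--         "dehydration", "nausea"
--     },
--     "mental_health": {
--         "panic", "severe_distress"
--     },
-- }
--
-- PRIORITY = [
--     "trauma_bleeding",
--     "cardiac",
--     "respiratory",
--     "neuro",
--     "allergic",
--     "infection_fever",
--     "gi_dehydration",
--     "mental_health",
-- ]
--
-- def pick_category(symptoms: set[str]) -> str: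
--     """
--     Assign category based on symptom matching.
--     Uses priority order if multiple categories match.
--     """
--     hits = []
--     for cat, symptom_set in CATEGORY_RULES.items():
--         if symptoms & symptom_set:
--             hits.append(cat)
--
--     if not hits:
--         return "other_unclear"
--
--     # Return highest priority match
--     for cat in PRIORITY:
--         if cat in hits:
--             return cat
--
--     return hits[0]
-- ===== SOURCE B (Python) =====
-- PRIORITY = [
--     "trauma_bleeding",
--     "cardiac",
--     "respiratory",
--     "neuro",
--     "allergic",
--     "infection_fever",
--     "gi_dehydration",
--     "mental_health",
-- ]
--
-- # Inverted rule table written out once: each symptom -> priority rank of its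
-- # (unique) category, i.e. the index of that category in PRIORITY.
-- SYMPTOM_RANK = {
--     "severe_bleeding": 0, "heavy_bleeding": 0, "moderate_bleeding": 0,
--     "major_trauma": 0, "head_injury": 0,
--     "chest_pain": 1, "chest_pain_crushing": 1, "palpitations": 1,
--     "shortness_of_breath": 2, "wheezing": 2, "choking": 2,
--     "trouble_breathing": 2, "turning_blue": 2,
--     "seizure_now": 3, "fainting": 3, "face_droop": 3, "slurred_speech": 3,
--     "arm_weakness": 3, "stroke_signs": 3, "confusion": 3, "unconscious": 3,
--     "not_responding": 3,
--     "rash": 4, "swelling_face_lips": 4, "anaphylaxis_signs": 4,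
--     "severe_allergy_swelling": 4,
--     "fever": 5, "high_fever": 5, "chills": 5,
--     "vomiting": 6, "vomiting_severe": 6, "diarrhea": 6, "diarrhea_severe": 6,
--     "dehydration": 6, "nausea": 6,
--     "panic": 7, "severe_distress": 7,
-- }
--
-- def pick_category(symptoms: set[str]) -> str:
--     """Single pass: track the minimum priority rank among recognised symptoms."""
--     best = None
--     for s in symptoms:
--         r = SYMPTOM_RANK.get(s)
--         if r is not None and (best is None or r < best):
--             best = r
--     return "other_unclear" if best is None else PRIORITY[best]
-- ===== Notes on version B (the rewrite author's own statement) =====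
-- stated objective: alternative
-- what changed: B replaces A's two staged passes (intersect every category's symptom set to build a hits list, then rescan PRIORITY for the first hit) by a single fold over the input symptoms that tracks the minimum priority rank via a precomputed symptom-to-rank index, indexing PRIORITY once at the end.
import Mathlib
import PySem

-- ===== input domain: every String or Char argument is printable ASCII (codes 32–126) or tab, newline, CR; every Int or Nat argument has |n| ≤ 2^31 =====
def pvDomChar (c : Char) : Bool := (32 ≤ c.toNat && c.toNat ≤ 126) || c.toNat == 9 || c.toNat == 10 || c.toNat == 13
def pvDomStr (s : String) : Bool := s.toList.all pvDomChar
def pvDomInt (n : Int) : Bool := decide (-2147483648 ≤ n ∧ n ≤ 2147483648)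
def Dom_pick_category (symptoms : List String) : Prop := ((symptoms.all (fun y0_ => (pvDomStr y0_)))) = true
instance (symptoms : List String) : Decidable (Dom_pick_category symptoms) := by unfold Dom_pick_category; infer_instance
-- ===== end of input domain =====

set_option maxRecDepth 10000


-- B replaces A's staged category-set intersections + PRIORITY rescan by one fold over the
-- input tracking the minimum priority rank via a precomputed symptom→rank index
-- (objective: alternative; same cost on this fixed rule table).
-- The Python argument is a set[str]; it is modelled as the List String of its distinct elements.

-- ===== PORT A =====
def CATEGORY_RULES : PySem.Dict String (PySem.Set String) := PySem.Dict.ofList [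
  ("trauma_bleeding", PySem.Set.ofList ["severe_bleeding","heavy_bleeding","moderate_bleeding","major_trauma","head_injury"]),
    ("cardiac", PySem.Set.ofList ["chest_pain","chest_pain_crushing","palpitations"]),
    ("respiratory", PySem.Set.ofList ["shortness_of_breath","wheezing","choking","trouble_breathing","turning_blue"]),
    ("neuro", PySem.Set.ofList ["seizure_now","fainting","face_droop","slurred_speech","arm_weakness","stroke_signs","confusion","unconscious","not_responding"]),
    ("allergic", PySem.Set.ofList ["rash","swelling_face_lips","anaphylaxis_signs","severe_allergy_swelling"]),
    ("infection_fever", PySem.Set.ofList ["fever","high_fever","chills"]),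
    ("gi_dehydration", PySem.Set.ofList ["vomiting","vomiting_severe","diarrhea","diarrhea_severe","dehydration","nausea"]),
    ("mental_health", PySem.Set.ofList ["panic","severe_distress"])]

def PRIORITY : List String :=
  ["trauma_bleeding","cardiac","respiratory","neuro","allergic","infection_fever","gi_dehydration","mental_health"]

def pick_category (symptoms : List String) : String :=
  -- hits = []; for cat, symptom_set in CATEGORY_RULES.items(): if symptoms & symptom_set: hits.append(cat)
  let hits := CATEGORY_RULES.items.foldl (fun hits p =>
      if PySem.Set.inter (PySem.Set.ofList symptoms) p.2 ≠ [] then hits ++ [p.1] else hits) []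
  if hits = [] then "other_unclear"
  else match PRIORITY.find? (fun cat => hits.contains cat) with
       | some cat => cat
       | none => hits.headD ""   -- hits[0]; this branch has hits ≠ [], so headD is exact here

-- ===== PORT B =====
-- SYMPTOM_RANK: literal dict symptom → index of its category in PRIORITY (from Source B)
def SYMPTOM_RANK : PySem.Dict String Int := PySem.Dict.ofList [
  ("severe_bleeding",0),("heavy_bleeding",0),("moderate_bleeding",0),("major_trauma",0),("head_injury",0),
  ("chest_pain",1),("chest_pain_crushing",1),("palpitations",1),
  ("shortness_of_breath",2),("wheezing",2),("choking",2),("trouble_breathing",2),("turning_blue",2),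
  ("seizure_now",3),("fainting",3),("face_droop",3),("slurred_speech",3),("arm_weakness",3),
  ("stroke_signs",3),("confusion",3),("unconscious",3),("not_responding",3),
  ("rash",4),("swelling_face_lips",4),("anaphylaxis_signs",4),("severe_allergy_swelling",4),
  ("fever",5),("high_fever",5),("chills",5),
  ("vomiting",6),("vomiting_severe",6),("diarrhea",6),("diarrhea_severe",6),("dehydration",6),("nausea",6),
  ("panic",7),("severe_distress",7)]

-- the loop body: if r is not None and (best is None or r < best): best = r
def rankStep (best : Option Int) (r : Option Int) : Option Int :=
  match r with
  | none => best
  | some rv =>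
    match best with
    | none => some rv
    | some bv => if rv < bv then some rv else best

def pick_category_alt (symptoms : List String) : String :=
  let best := symptoms.foldl (fun best s => rankStep best (SYMPTOM_RANK.get? s)) none
  match best with
  | none => "other_unclear"
  | some r => (PySem.List.pyGet? PRIORITY r).getD ""   -- PRIORITY[best]; best is always a stored rank 0..7, so in range: exact

-- ===== PRECONDITION & SPEC =====
def Spec_pick_category (symptoms : List String) (out : String) : Prop := out = pick_category_alt symptoms
instance (symptoms : List String) (out : String) : Decidable (Spec_pick_category symptoms out) := by unfold Spec_pick_category; infer_instance

-- ===== CLAIM (what is proved, stated in full; the proofs are below) =====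
def Claim_equal_pick_category : Prop := ∀ (symptoms : List String), Dom_pick_category symptoms → Spec_pick_category symptoms (pick_category symptoms)

-- ===== LEMMAS AND PROOFS =====

-- reference selector: the result as a function of the eight "some input symptom is in category i" flags
def selRef (b1 b2 b3 b4 b5 b6 b7 b8 : Bool) : String :=
  if b1 then "trauma_bleeding" else if b2 then "cardiac" else if b3 then "respiratory"
  else if b4 then "neuro" else if b5 then "allergic" else if b6 then "infection_fever"
  else if b7 then "gi_dehydration" else if b8 then "mental_health" else "other_unclear"

-- the minimum matched rank as a function of the same eight flags
def selOpt (b1 b2 b3 b4 b5 b6 b7 b8 : Bool) : Option Int :=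
  if b1 then some 0 else if b2 then some 1 else if b3 then some 2 else if b4 then some 3
  else if b5 then some 4 else if b6 then some 5 else if b7 then some 6 else if b8 then some 7
  else none

-- a Python set intersection is truthy iff some element of xs lies in ts
lemma interA (xs ts : List String) :
    (PySem.Set.inter (PySem.Set.ofList xs) ts ≠ []) ↔ xs.any (fun s => ts.contains s) = true := by
  rw [Ne, List.eq_nil_iff_forall_not_mem]
  push Not
  simp only [PySem.Set.mem_inter, PySem.Set.mem_ofList, List.any_eq_true, List.contains_iff_mem]

lemma pick_category_eq (symptoms : List String) :
    pick_category symptoms =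
      selRef
      (symptoms.any (fun s => (["severe_bleeding","heavy_bleeding","moderate_bleeding","major_trauma","head_injury"] : List String).contains s))
      (symptoms.any (fun s => (["chest_pain","chest_pain_crushing","palpitations"] : List String).contains s))
      (symptoms.any (fun s => (["shortness_of_breath","wheezing","choking","trouble_breathing","turning_blue"] : List String).contains s))
      (symptoms.any (fun s => (["seizure_now","fainting","face_droop","slurred_speech","arm_weakness","stroke_signs","confusion","unconscious","not_responding"] : List String).contains s))
      (symptoms.any (fun s => (["rash","swelling_face_lips","anaphylaxis_signs","severe_allergy_swelling"] : List String).contains s))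
      (symptoms.any (fun s => (["fever","high_fever","chills"] : List String).contains s))
      (symptoms.any (fun s => (["vomiting","vomiting_severe","diarrhea","diarrhea_severe","dehydration","nausea"] : List String).contains s))
      (symptoms.any (fun s => (["panic","severe_distress"] : List String).contains s)) := by
  unfold pick_category
  have hitems : CATEGORY_RULES.items = [
    ("trauma_bleeding", ["severe_bleeding","heavy_bleeding","moderate_bleeding","major_trauma","head_injury"]),
    ("cardiac", ["chest_pain","chest_pain_crushing","palpitations"]),
    ("respiratory", ["shortness_of_breath","wheezing","choking","trouble_breathing","turning_blue"]),
    ("neuro", ["seizure_now","fainting","face_droop","slurred_speech","arm_weakness","stroke_signs","confusion","unconscious","not_responding"]),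
    ("allergic", ["rash","swelling_face_lips","anaphylaxis_signs","severe_allergy_swelling"]),
    ("infection_fever", ["fever","high_fever","chills"]),
    ("gi_dehydration", ["vomiting","vomiting_severe","diarrhea","diarrhea_severe","dehydration","nausea"]),
    ("mental_health", ["panic","severe_distress"])] := by decide
  rw [hitems]
  simp only [List.foldl_cons, List.foldl_nil, interA]
  generalize (symptoms.any fun s => (["severe_bleeding","heavy_bleeding","moderate_bleeding","major_trauma","head_injury"] : List String).contains s) = b1
  generalize (symptoms.any fun s => (["chest_pain","chest_pain_crushing","palpitations"] : List String).contains s) = b2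
  generalize (symptoms.any fun s => (["shortness_of_breath","wheezing","choking","trouble_breathing","turning_blue"] : List String).contains s) = b3
  generalize (symptoms.any fun s => (["seizure_now","fainting","face_droop","slurred_speech","arm_weakness","stroke_signs","confusion","unconscious","not_responding"] : List String).contains s) = b4
  generalize (symptoms.any fun s => (["rash","swelling_face_lips","anaphylaxis_signs","severe_allergy_swelling"] : List String).contains s) = b5
  generalize (symptoms.any fun s => (["fever","high_fever","chills"] : List String).contains s) = b6
  generalize (symptoms.any fun s => (["vomiting","vomiting_severe","diarrhea","diarrhea_severe","dehydration","nausea"] : List String).contains s) = b7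
  generalize (symptoms.any fun s => (["panic","severe_distress"] : List String).contains s) = b8
  revert b1 b2 b3 b4 b5 b6 b7 b8
  decide

lemma rank_nodup : SYMPTOM_RANK.keys.Nodup := by decide

lemma rank_items : SYMPTOM_RANK.items = [
  ("severe_bleeding",0),("heavy_bleeding",0),("moderate_bleeding",0),("major_trauma",0),("head_injury",0),
  ("chest_pain",1),("chest_pain_crushing",1),("palpitations",1),
  ("shortness_of_breath",2),("wheezing",2),("choking",2),("trouble_breathing",2),("turning_blue",2),
  ("seizure_now",3),("fainting",3),("face_droop",3),("slurred_speech",3),("arm_weakness",3),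
  ("stroke_signs",3),("confusion",3),("unconscious",3),("not_responding",3),
  ("rash",4),("swelling_face_lips",4),("anaphylaxis_signs",4),("severe_allergy_swelling",4),
  ("fever",5),("high_fever",5),("chills",5),
  ("vomiting",6),("vomiting_severe",6),("diarrhea",6),("diarrhea_severe",6),("dehydration",6),("nausea",6),
  ("panic",7),("severe_distress",7)] := by decide

lemma rank_of0 (s : String) : (SYMPTOM_RANK.get? s == some (0:Int)) = (["severe_bleeding","heavy_bleeding","moderate_bleeding","major_trauma","head_injury"] : List String).contains s := by
  have h := PySem.Dict.get?_eq_some_iff_mem_items (d := SYMPTOM_RANK) (k := s) (v := (0:Int)) rank_nodup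
  rw [Bool.eq_iff_iff, beq_iff_eq, h, rank_items]
  simp [Prod.ext_iff]

lemma rank_of1 (s : String) : (SYMPTOM_RANK.get? s == some (1:Int)) = (["chest_pain","chest_pain_crushing","palpitations"] : List String).contains s := by
  have h := PySem.Dict.get?_eq_some_iff_mem_items (d := SYMPTOM_RANK) (k := s) (v := (1:Int)) rank_nodup
  rw [Bool.eq_iff_iff, beq_iff_eq, h, rank_items]
  simp [Prod.ext_iff]

lemma rank_of2 (s : String) : (SYMPTOM_RANK.get? s == some (2:Int)) = (["shortness_of_breath","wheezing","choking","trouble_breathing","turning_blue"] : List String).contains s := by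
  have h := PySem.Dict.get?_eq_some_iff_mem_items (d := SYMPTOM_RANK) (k := s) (v := (2:Int)) rank_nodup
  rw [Bool.eq_iff_iff, beq_iff_eq, h, rank_items]
  simp [Prod.ext_iff]

lemma rank_of3 (s : String) : (SYMPTOM_RANK.get? s == some (3:Int)) = (["seizure_now","fainting","face_droop","slurred_speech","arm_weakness","stroke_signs","confusion","unconscious","not_responding"] : List String).contains s := by
  have h := PySem.Dict.get?_eq_some_iff_mem_items (d := SYMPTOM_RANK) (k := s) (v := (3:Int)) rank_nodup
  rw [Bool.eq_iff_iff, beq_iff_eq, h, rank_items]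
  simp [Prod.ext_iff]

lemma rank_of4 (s : String) : (SYMPTOM_RANK.get? s == some (4:Int)) = (["rash","swelling_face_lips","anaphylaxis_signs","severe_allergy_swelling"] : List String).contains s := by
  have h := PySem.Dict.get?_eq_some_iff_mem_items (d := SYMPTOM_RANK) (k := s) (v := (4:Int)) rank_nodup
  rw [Bool.eq_iff_iff, beq_iff_eq, h, rank_items]
  simp [Prod.ext_iff]

lemma rank_of5 (s : String) : (SYMPTOM_RANK.get? s == some (5:Int)) = (["fever","high_fever","chills"] : List String).contains s := by
  have h := PySem.Dict.get?_eq_some_iff_mem_items (d := SYMPTOM_RANK) (k := s) (v := (5:Int)) rank_nodup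
  rw [Bool.eq_iff_iff, beq_iff_eq, h, rank_items]
  simp [Prod.ext_iff]

lemma rank_of6 (s : String) : (SYMPTOM_RANK.get? s == some (6:Int)) = (["vomiting","vomiting_severe","diarrhea","diarrhea_severe","dehydration","nausea"] : List String).contains s := by
  have h := PySem.Dict.get?_eq_some_iff_mem_items (d := SYMPTOM_RANK) (k := s) (v := (6:Int)) rank_nodup
  rw [Bool.eq_iff_iff, beq_iff_eq, h, rank_items]
  simp [Prod.ext_iff]

lemma rank_of7 (s : String) : (SYMPTOM_RANK.get? s == some (7:Int)) = (["panic","severe_distress"] : List String).contains s := by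
  have h := PySem.Dict.get?_eq_some_iff_mem_items (d := SYMPTOM_RANK) (k := s) (v := (7:Int)) rank_nodup
  rw [Bool.eq_iff_iff, beq_iff_eq, h, rank_items]
  simp [Prod.ext_iff]

-- every stored rank is one of 0..7
lemma rank_range (s : String) (i : Int) (h : SYMPTOM_RANK.get? s = some i) :
    i = 0 ∨ i = 1 ∨ i = 2 ∨ i = 3 ∨ i = 4 ∨ i = 5 ∨ i = 6 ∨ i = 7 := by
  have h2 := (PySem.Dict.get?_eq_some_iff_mem_items (d := SYMPTOM_RANK) (k := s) (v := i) rank_nodup).mp h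
  rw [rank_items] at h2
  simp [Prod.ext_iff] at h2
  omega

lemma rankStep_assoc (a b c : Option Int) :
    rankStep (rankStep a b) c = rankStep a (rankStep b c) := by
  rcases a with _|av <;> rcases b with _|bv <;> rcases c with _|cv <;>
    simp only [rankStep] <;> split_ifs <;> simp only [rankStep] <;> split_ifs <;>
    simp_all <;> omega

lemma rankStep_comm (a b : Option Int) :
    rankStep a b = rankStep b a := by
  rcases a with _|av <;> rcases b with _|bv <;>
    simp only [rankStep] <;> split_ifs <;> simp_all <;> omega

-- updating one flag to true shifts selOpt by a rankStep with that rank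
lemma sel_update (i : Int) (hi : i = 0 ∨ i = 1 ∨ i = 2 ∨ i = 3 ∨ i = 4 ∨ i = 5 ∨ i = 6 ∨ i = 7)
    (c1 c2 c3 c4 c5 c6 c7 c8 : Bool) :
    selOpt ((some i == some (0:Int)) || c1) ((some i == some (1:Int)) || c2)
           ((some i == some (2:Int)) || c3) ((some i == some (3:Int)) || c4)
           ((some i == some (4:Int)) || c5) ((some i == some (5:Int)) || c6)
           ((some i == some (6:Int)) || c7) ((some i == some (7:Int)) || c8)
      = rankStep (selOpt c1 c2 c3 c4 c5 c6 c7 c8) (some i) := by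
  rcases hi with rfl|rfl|rfl|rfl|rfl|rfl|rfl|rfl <;>
    revert c1 c2 c3 c4 c5 c6 c7 c8 <;> decide

-- B's fold computes the minimum stored rank of the symptoms seen so far
lemma fold_char (xs : List String) (b : Option Int) :
    xs.foldl (fun best s => rankStep best (SYMPTOM_RANK.get? s)) b
      = rankStep b (selOpt
          (xs.any fun s => SYMPTOM_RANK.get? s == some (0:Int))
          (xs.any fun s => SYMPTOM_RANK.get? s == some (1:Int))
          (xs.any fun s => SYMPTOM_RANK.get? s == some (2:Int))
          (xs.any fun s => SYMPTOM_RANK.get? s == some (3:Int))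
          (xs.any fun s => SYMPTOM_RANK.get? s == some (4:Int))
          (xs.any fun s => SYMPTOM_RANK.get? s == some (5:Int))
          (xs.any fun s => SYMPTOM_RANK.get? s == some (6:Int))
          (xs.any fun s => SYMPTOM_RANK.get? s == some (7:Int))) := by
  induction xs generalizing b with
  | nil => cases b <;> rfl
  | cons x xs ih =>
    simp only [List.foldl_cons, List.any_cons, ih]
    cases h : SYMPTOM_RANK.get? x with
    | none => simp [rankStep]
    | some i =>
      have hi := rank_range x i h
      rw [sel_update i hi, rankStep_assoc, rankStep_comm (some i)]

lemma pick_category_alt_eq (symptoms : List String) :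
    pick_category_alt symptoms =
      selRef
      (symptoms.any (fun s => (["severe_bleeding","heavy_bleeding","moderate_bleeding","major_trauma","head_injury"] : List String).contains s))
      (symptoms.any (fun s => (["chest_pain","chest_pain_crushing","palpitations"] : List String).contains s))
      (symptoms.any (fun s => (["shortness_of_breath","wheezing","choking","trouble_breathing","turning_blue"] : List String).contains s))
      (symptoms.any (fun s => (["seizure_now","fainting","face_droop","slurred_speech","arm_weakness","stroke_signs","confusion","unconscious","not_responding"] : List String).contains s))
      (symptoms.any (fun s => (["rash","swelling_face_lips","anaphylaxis_signs","severe_allergy_swelling"] : List String).contains s))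
      (symptoms.any (fun s => (["fever","high_fever","chills"] : List String).contains s))
      (symptoms.any (fun s => (["vomiting","vomiting_severe","diarrhea","diarrhea_severe","dehydration","nausea"] : List String).contains s))
      (symptoms.any (fun s => (["panic","severe_distress"] : List String).contains s)) := by
  unfold pick_category_alt
  rw [fold_char]
  simp only [rank_of0, rank_of1, rank_of2, rank_of3, rank_of4, rank_of5, rank_of6, rank_of7]
  generalize (symptoms.any fun s => (["severe_bleeding","heavy_bleeding","moderate_bleeding","major_trauma","head_injury"] : List String).contains s) = b1
  generalize (symptoms.any fun s => (["chest_pain","chest_pain_crushing","palpitations"] : List String).contains s) = b2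
  generalize (symptoms.any fun s => (["shortness_of_breath","wheezing","choking","trouble_breathing","turning_blue"] : List String).contains s) = b3
  generalize (symptoms.any fun s => (["seizure_now","fainting","face_droop","slurred_speech","arm_weakness","stroke_signs","confusion","unconscious","not_responding"] : List String).contains s) = b4
  generalize (symptoms.any fun s => (["rash","swelling_face_lips","anaphylaxis_signs","severe_allergy_swelling"] : List String).contains s) = b5
  generalize (symptoms.any fun s => (["fever","high_fever","chills"] : List String).contains s) = b6
  generalize (symptoms.any fun s => (["vomiting","vomiting_severe","diarrhea","diarrhea_severe","dehydration","nausea"] : List String).contains s) = b7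
  generalize (symptoms.any fun s => (["panic","severe_distress"] : List String).contains s) = b8
  revert b1 b2 b3 b4 b5 b6 b7 b8
  decide

-- ===== VERDICT (by name: the statement is the Claim_ definition above) =====
theorem pick_category_spec : Claim_equal_pick_category := by
  intro symptoms _
  unfold Spec_pick_category
  rw [pick_category_eq, pick_category_alt_eq]
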